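-- pv_equiv track=rewrite | github.com/Shaikh-UC-DAVIS/note-agent-ML | ml/chunk_text.py | sliding_window_ranges
-- ===== SOURCE A (Python) =====
-- def sliding_window_ranges(n_tokens: int, window_size: int, overlap: int):
--     if window_size <= 0:
--         raise ValueError("window_size must be > 0")
--     if overlap < 0:
--         raise ValueError("overlap must be >= 0")
--     if overlap >= window_size:
--         raise ValueError("overlap must be < window_size")
--
--     step = window_size - overlap
--     ranges = []
--     start = 0
--
--     while start < n_tokens:
--         end = min(start + window_size, n_tokens)
--         ranges.append((start, end))
--         if end == n_tokens:
--             break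
--         start += step
--
--     return ranges
-- ===== SOURCE B (Python) =====
-- def sliding_window_ranges(n_tokens: int, window_size: int, overlap: int):
--     if window_size <= 0:
--         raise ValueError("window_size must be > 0")
--     if overlap < 0:
--         raise ValueError("overlap must be >= 0")
--     if overlap >= window_size:
--         raise ValueError("overlap must be < window_size")
--
--     step = window_size - overlap
--     if n_tokens <= 0:
--         return []
--     count = max(0, -(-(n_tokens - window_size) // step)) + 1
--     return [(i * step, min(i * step + window_size, n_tokens)) for i in range(count)]
-- ===== Notes on version B (the rewrite author's own statement) =====
-- stated objective: alternative
-- what changed: Replaces the while-loop-with-break accumulation by a closed-form ceiling-division count of windows and a direct list comprehension over range(count).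
import Mathlib
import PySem

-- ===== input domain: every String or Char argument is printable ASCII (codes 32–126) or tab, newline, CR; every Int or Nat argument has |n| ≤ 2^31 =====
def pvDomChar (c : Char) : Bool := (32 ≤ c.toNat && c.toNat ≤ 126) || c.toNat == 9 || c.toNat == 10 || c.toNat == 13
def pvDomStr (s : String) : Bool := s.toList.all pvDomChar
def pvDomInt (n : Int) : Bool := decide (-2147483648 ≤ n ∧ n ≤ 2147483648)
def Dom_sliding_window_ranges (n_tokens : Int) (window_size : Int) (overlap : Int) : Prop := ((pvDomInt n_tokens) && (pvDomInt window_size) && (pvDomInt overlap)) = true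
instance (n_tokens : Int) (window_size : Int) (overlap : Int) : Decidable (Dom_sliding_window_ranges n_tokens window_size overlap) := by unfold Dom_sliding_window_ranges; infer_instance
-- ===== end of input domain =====

-- B replaces A's while-loop accumulation by a closed-form ceiling-division window count
-- plus a direct comprehension over range(count) (objective: alternative decomposition).


-- ===== PORT A =====
-- the while loop of A; the '0 < step' conjunct only makes the recursion total
-- (Python reaches the loop only after the checks, which force step ≥ 1)
def slidingLoopA (n w step start : Int) : List (Int × Int) :=
  if h : start < n ∧ 0 < step then
    let e := min (start + w) n
    if e = n then [(start, e)]
    else (start, e) :: slidingLoopA n w step (start + step)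
  else []
termination_by (n - start).toNat
decreasing_by omega

def sliding_window_ranges (n_tokens : Int) (window_size : Int) (overlap : Int) : List (Int × Int) :=
  if window_size ≤ 0 then []          -- raise ValueError (excluded by Pre_)
  else if overlap < 0 then []         -- raise ValueError (excluded by Pre_)
  else if window_size ≤ overlap then []  -- raise ValueError (excluded by Pre_)
  else slidingLoopA n_tokens window_size (window_size - overlap) 0

-- ===== PORT B =====
def sliding_window_ranges_alt (n_tokens : Int) (window_size : Int) (overlap : Int) : List (Int × Int) :=
  if window_size ≤ 0 then []
  else if overlap < 0 then []
  else if window_size ≤ overlap then []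
  else
    let step := window_size - overlap
    if n_tokens ≤ 0 then []
    else
      let count := max 0 (-(PySem.Int.floordiv (-(n_tokens - window_size)) step)) + 1
      (PySem.List.pyRange 0 count 1).map
        (fun i => (i * step, min (i * step + window_size) n_tokens))

-- ===== PRECONDITION & SPEC =====
-- Pre_ excludes exactly the inputs on which A raises ValueError (its three explicit checks).
def Pre_sliding_window_ranges (n_tokens : Int) (window_size : Int) (overlap : Int) : Prop :=
  0 < window_size ∧ 0 ≤ overlap ∧ overlap < window_size
instance (n_tokens : Int) (window_size : Int) (overlap : Int) : Decidable (Pre_sliding_window_ranges n_tokens window_size overlap) := by unfold Pre_sliding_window_ranges; infer_instance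

def pvWitness_sliding_window_ranges : Int × Int × Int := (10, 4, 2)

def Spec_sliding_window_ranges (n_tokens : Int) (window_size : Int) (overlap : Int) (out : List (Int × Int)) : Prop := out = sliding_window_ranges_alt n_tokens window_size overlap
instance (n_tokens : Int) (window_size : Int) (overlap : Int) (out : List (Int × Int)) : Decidable (Spec_sliding_window_ranges n_tokens window_size overlap out) := by unfold Spec_sliding_window_ranges; infer_instance

-- ===== CLAIM (what is proved, stated in full; the proofs are below) =====
def Claim_equal_sliding_window_ranges : Prop := ∀ (n_tokens : Int) (window_size : Int) (overlap : Int), Dom_sliding_window_ranges n_tokens window_size overlap → Pre_sliding_window_ranges n_tokens window_size overlap → Spec_sliding_window_ranges n_tokens window_size overlap (sliding_window_ranges n_tokens window_size overlap)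

-- ===== LEMMAS AND PROOFS =====

-- A's loop, started at the k-th window start, equals B's comprehension from index k on.
lemma slidingLoopA_eq (n w step q : Int) (hstep : 0 < step) (hsw : step ≤ w) (hn : 0 < n)
    (hq1 : (q - 1) * step < n - w) (hq2 : n - w ≤ q * step) :
    ∀ (m : Nat) (k : Int), 0 ≤ k → k ≤ max 0 q → (max 0 q - k).toNat = m →
      slidingLoopA n w step (k * step) =
        (PySem.List.pyRange k (max 0 q + 1) 1).map
          (fun i => (i * step, min (i * step + w) n)) := by
  intro m
  induction m with
  | zero =>
    intro k hk0 hkq hm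
    have hk : k = max 0 q := by omega
    subst hk
    have hstart : max 0 q * step < n := by
      by_cases hq : q ≤ 0
      · have : max 0 q = 0 := by omega
        rw [this]; simpa using hn
      · have : max 0 q = q := by omega
        rw [this]
        nlinarith
    have hend : n ≤ max 0 q * step + w := by
      by_cases hq : q ≤ 0
      · have hmq : max 0 q = 0 := by omega
        have : q * step ≤ 0 := mul_nonpos_of_nonpos_of_nonneg (by omega) (by omega)
        rw [hmq]; omega
      · have : max 0 q = q := by omega
        rw [this]; omega
    rw [slidingLoopA]
    rw [dif_pos ⟨hstart, hstep⟩]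
    have hmin : min (max 0 q * step + w) n = n := by omega
    rw [PySem.List.pyRange_one_cons (by omega), PySem.List.pyRange_one_eq_nil (by omega)]
    simp [hmin]
  | succ m ih =>
    intro k hk0 hkq hm
    have hkq' : k < q := by omega
    have hstart : k * step < n - w + step := by nlinarith
    have hnotend : k * step + w < n := by nlinarith
    rw [slidingLoopA]
    rw [dif_pos ⟨by omega, hstep⟩]
    have hmin : min (k * step + w) n = k * step + w := by omega
    rw [PySem.List.pyRange_one_cons (by omega)]
    have hrec : slidingLoopA n w step (k * step + step) =
        (PySem.List.pyRange (k + 1) (max 0 q + 1) 1).map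
          (fun i => (i * step, min (i * step + w) n)) := by
      have := ih (k + 1) (by omega) (by omega) (by omega)
      rw [← this]; ring_nf
    simp only [hmin, if_neg (by omega : ¬ (k * step + w = n)), hrec, List.map_cons]

-- ===== VERDICT (by name: the statement is the Claim_ definition above) =====
theorem sliding_window_ranges_spec : Claim_equal_sliding_window_ranges := by
  intro n w ov _ hpre
  obtain ⟨hw, hov0, hovw⟩ := hpre
  unfold Spec_sliding_window_ranges sliding_window_ranges sliding_window_ranges_alt
  rw [if_neg (by omega), if_neg (by omega), if_neg (by omega)]
  rw [if_neg (by omega), if_neg (by omega), if_neg (by omega)]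
  set step := w - ov with hstepdef
  have hstep : 0 < step := by omega
  by_cases hn : n ≤ 0
  · rw [if_pos hn, slidingLoopA, dif_neg (by omega)]
  · rw [if_neg hn]
    replace hn : 0 < n := by omega
    set q := -(PySem.Int.floordiv (-(n - w)) step) with hqdef
    have hq : (q - 1) * step < n - w ∧ n - w ≤ q * step := by
      have := (PySem.Int.neg_floordiv_neg_eq_iff_of_pos (a := n - w) (b := step) (q := q) hstep).mp rfl
      exact this
    have := slidingLoopA_eq n w step q hstep (by omega) hn hq.1 hq.2
      (max 0 q - 0).toNat 0 le_rfl (by omega) rfl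
    simpa using this
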